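-- pv_equiv track=rewrite | github.com/ValmeI/err_downloader | settings.py | _add_blank_lines_before_sections
-- ===== SOURCE A (Python) =====
-- def _add_blank_lines_before_sections(content: str) -> str:
--     """Add blank lines before each top-level YAML section for readability."""
--     lines = content.split('\n')
--     result = []
--
--     for i, line in enumerate(lines):
--         # Check if this is a top-level key (no indentation, no list marker, contains colon)
--         if line and not line.startswith(' ') and not line.startswith('-') and ':' in line and i > 0:
--             # Add blank line before section if previous line is not already blank
--             if result and result[-1] != '':
--                 result.append('')
--         result.append(line)
--
--     return '\n'.join(result)
-- ===== SOURCE B (Python) =====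
-- import re
--
-- _SECTION_GAP = re.compile(r'(?<=[^\n]\n)(?=[^ \n\-])(?=[^\n]*:)')
--
-- def _add_blank_lines_before_sections(content: str) -> str:
--     """One regex substitution over the whole string: insert '\n' at every
--     line-start gap whose previous line is nonempty (lookbehind [^\n]\n) and
--     whose line is a top-level key (starts with a non-space/non-dash char and
--     contains ':' before the next newline). No split, no loop, no list."""
--     return _SECTION_GAP.sub('\n', content)
-- ===== Notes on version B (the rewrite author's own statement) =====
-- stated objective: idiomatic
-- what changed: Replaces A's split/enumerate/accumulate/join pipeline with a single zero-width regex substitution over the raw string (lookbehind for a nonempty previous line, lookaheads for a top-level key), so there is no line list, no index and no accumulator at all.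
import Mathlib
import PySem

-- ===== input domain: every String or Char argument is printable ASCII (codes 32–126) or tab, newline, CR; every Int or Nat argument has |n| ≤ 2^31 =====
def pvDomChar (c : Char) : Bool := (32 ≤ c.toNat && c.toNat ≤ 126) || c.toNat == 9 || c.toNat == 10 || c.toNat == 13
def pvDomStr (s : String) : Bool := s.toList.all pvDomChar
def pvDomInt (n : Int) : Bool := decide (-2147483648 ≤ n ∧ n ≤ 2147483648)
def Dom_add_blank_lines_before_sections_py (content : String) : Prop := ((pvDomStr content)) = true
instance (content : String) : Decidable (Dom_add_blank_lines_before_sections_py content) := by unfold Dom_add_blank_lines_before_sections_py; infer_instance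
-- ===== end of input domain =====

-- B replaces A's split/enumerate/accumulate/join pipeline by one zero-width regex
-- substitution over the raw string; same output proved on all inputs, same O(n) cost.

-- ===== PORT A =====
-- Lines are kept as List Char (split/join ported via PySem.Chars, exact for str.split('\n')/'\n'.join).
def add_blank_lines_before_sections_py (content : String) : String :=
  let lines := PySem.Chars.splitOn content.toList ['\n']
  let result := (PySem.List.enumerate lines).foldl
    (fun result p =>
      let i := p.1
      let line := p.2
      -- if line and not line.startswith(' ') and not line.startswith('-') and ':' in line and i > 0:
      let result :=
        if (line ≠ [] && !(PySem.Chars.startswith line [' ']) && !(PySem.Chars.startswith line ['-'])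
            && PySem.Chars.isIn [':'] line && decide (i > 0)) then
          -- if result and result[-1] != '':  result.append('')
          (if (result ≠ ([] : List (List Char)) && result.getLast? != some []) then result ++ [[]] else result)
        else result
      result ++ [line])
    []
  String.ofList (PySem.Chars.join ['\n'] result)

-- ===== PORT B =====
-- Hand port of re.sub with the FIXED pattern r'(?<=[^\n]\n)(?=[^ \n\-])(?=[^\n]*:)' and
-- replacement '\n': the pattern is zero-width, so re.sub inserts '\n' at every gap
-- position whose two preceding chars are <non-newline,'\n'> (lookbehind), whose next
-- char exists and is none of ' ','\n','-', and which is followed by a ':' before the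
-- next '\n'. pvSubGo scans the string once carrying the last two chars (p2,p1) and
-- tests exactly these conditions at each gap — exact for this pattern.
def pvKeyAhead : List Char → Bool          -- lookahead (?=[^\n]*:)
  | [] => false
  | c :: t => if c == '\n' then false else if c == ':' then true else pvKeyAhead t

def pvLookbehind (p2 p1 : Option Char) : Bool :=   -- lookbehind (?<=[^\n]\n)
  p1 == some '\n' && (match p2 with | some d => d != '\n' | none => false)

def pvSubGo (p2 p1 : Option Char) : List Char → List Char
  | [] => []
  | c :: t =>
    if pvLookbehind p2 p1 && !(c == ' ') && !(c == '\n') && !(c == '-') && pvKeyAhead (c :: t)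
    then '\n' :: c :: pvSubGo p1 (some c) t
    else c :: pvSubGo p1 (some c) t

def add_blank_lines_before_sections_py_alt (content : String) : String :=
  String.ofList (pvSubGo none none content.toList)

-- ===== PRECONDITION & SPEC =====
def Spec_add_blank_lines_before_sections_py (content : String) (out : String) : Prop := out = add_blank_lines_before_sections_py_alt content
instance (content : String) (out : String) : Decidable (Spec_add_blank_lines_before_sections_py content out) := by unfold Spec_add_blank_lines_before_sections_py; infer_instance

-- ===== CLAIM (what is proved, stated in full; the proofs are below) =====
def Claim_equal_add_blank_lines_before_sections_py : Prop := ∀ (content : String), Dom_add_blank_lines_before_sections_py content → Spec_add_blank_lines_before_sections_py content (add_blank_lines_before_sections_py content)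

-- ===== LEMMAS AND PROOFS =====

-- the key predicate of both programs, on one line
def pvAltIsKey (cur : List Char) : Bool :=
  match cur with
  | [] => false
  | c :: _ => !(c == ' ') && !(c == '-') && PySem.Chars.isIn [':'] cur

theorem sw_single (c : Char) (t : List Char) (b : Char) : PySem.Chars.startswith (c :: t) [b] = (c == b) := by
  by_cases h : c = b
  · subst h
    simp only [beq_self_eq_true]
    exact (PySem.Chars.startswith_iff (c :: t) [c]).mpr (by simp [List.cons_prefix_cons])
  · have hb : ¬ ([b] <+: c :: t) := by
      simp [List.cons_prefix_cons]
      intro hh; exact absurd hh.symm h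
    have hf : PySem.Chars.startswith (c :: t) [b] = false :=
      Bool.eq_false_iff.mpr (fun hc => hb ((PySem.Chars.startswith_iff (c :: t) [b]).mp hc))
    simp [hf, beq_eq_false_iff_ne.mpr h]

theorem pvKey_eq (line : List Char) :
    (line ≠ [] && !(PySem.Chars.startswith line [' ']) && !(PySem.Chars.startswith line ['-'])
      && PySem.Chars.isIn [':'] line) = pvAltIsKey line := by
  cases line with
  | nil => simp [pvAltIsKey]
  | cons c t => simp [pvAltIsKey, sw_single, Bool.and_assoc]

-- what A's fold appends after the first line
def pvSpill (prev : List Char) : List (List Char) → List (List Char)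
  | [] => []
  | c :: cs => (if prev ≠ [] && pvAltIsKey c then [[], c] else [c]) ++ pvSpill c cs

theorem pvFoldA (rest : List (List Char)) :
    ∀ (acc : List (List Char)) (prev : List Char) (n : Int), 0 < n → acc ≠ [] →
      acc.getLast? = some prev →
      (PySem.List.enumerate rest n).foldl
        (fun result p =>
          (if (p.2 ≠ [] && !(PySem.Chars.startswith p.2 [' ']) && !(PySem.Chars.startswith p.2 ['-'])
                && PySem.Chars.isIn [':'] p.2 && decide (p.1 > 0)) then
              (if (result ≠ ([] : List (List Char)) && result.getLast? != some []) then result ++ [[]] else result)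
            else result) ++ [p.2]) acc
      = acc ++ pvSpill prev rest := by
  induction rest with
  | nil => intro acc prev n _ _ _; simp [pvSpill, PySem.List.enumerate_nil]
  | cons c cs ih =>
    intro acc prev n hn hne hlast
    simp only [PySem.List.enumerate_cons, List.foldl_cons]
    have hn' : decide ((n:Int) > 0) = true := by simpa using hn
    have hstep : (if (c ≠ [] && !(PySem.Chars.startswith c [' ']) && !(PySem.Chars.startswith c ['-'])
                  && PySem.Chars.isIn [':'] c && decide ((n:Int) > 0)) then
                (if (acc ≠ ([] : List (List Char)) && acc.getLast? != some []) then acc ++ [[]] else acc)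
              else acc) ++ [c]
        = acc ++ (if (prev ≠ [] && pvAltIsKey c) then [[], c] else [c]) := by
      rw [pvKey_eq, hn', Bool.and_true, hlast]
      by_cases hp : prev = []
      · simp [hp]
      · by_cases hc : pvAltIsKey c = true <;> simp [hp, hc, hne]
    rw [hstep]
    have hX : (acc ++ (if (prev ≠ [] && pvAltIsKey c) then [[], c] else [c])).getLast? = some c := by
      simp only [List.getLast?_append]
      split_ifs <;> simp
    rw [ih _ c (n+1) (by omega) (by split_ifs <;> simp) hX]
    simp [pvSpill, List.append_assoc]

-- ---- characterisation of splitOn on a single-char separator ----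
def pvLines (cur : List Char) : List Char → List (List Char)
  | [] => [cur]
  | c :: rest => if c = '\n' then cur :: pvLines [] rest else pvLines (cur ++ [c]) rest

theorem pvLines_nil (cur : List Char) : pvLines cur [] = [cur] := rfl
theorem pvLines_nl (cur rest : List Char) : pvLines cur ('\n' :: rest) = cur :: pvLines [] rest := by
  rw [pvLines, if_pos rfl]
theorem pvLines_other {c : Char} (hc : c ≠ '\n') (cur rest : List Char) :
    pvLines cur (c :: rest) = pvLines (cur ++ [c]) rest := by
  rw [pvLines, if_neg hc]

theorem pvSplitGo (fuel : Nat) :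
    ∀ (l cur : List Char) (acc : List (List Char)), l.length < fuel →
      PySem.Chars.splitOn.go ['\n'] fuel l cur acc = acc.reverse ++ pvLines cur.reverse l := by
  induction fuel with
  | zero => intro l cur acc h; omega
  | succ n ih =>
    intro l cur acc h
    cases l with
    | nil => simp [PySem.Chars.splitOn.go, pvLines]
    | cons c rest =>
      by_cases hc : c = '\n'
      · subst hc
        have hp : List.isPrefixOf ['\n'] ('\n' :: rest) = true := by simp [List.isPrefixOf]
        rw [PySem.Chars.splitOn.go, if_pos hp]
        simp only [List.length_nil, List.length_cons, List.drop_succ_cons, List.drop_zero]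
        rw [ih rest [] ((cur.reverse) :: acc) (by simp at h; omega)]
        simp [pvLines_nl]
      · have hp : List.isPrefixOf ['\n'] (c :: rest) = false := by
          simp [List.isPrefixOf]; exact fun hh => absurd hh.symm hc
        rw [PySem.Chars.splitOn.go, if_neg (by simp [hp])]
        rw [ih rest (c :: cur) acc (by simp at h; omega)]
        rw [pvLines_other hc]
        simp

theorem pvSplit_eq (cs : List Char) : PySem.Chars.splitOn cs ['\n'] = pvLines [] cs := by
  unfold PySem.Chars.splitOn
  rw [pvSplitGo (cs.length + 1) cs [] [] (by omega)]
  simp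

theorem pvLines_ne_nil (cs : List Char) : ∀ cur, pvLines cur cs ≠ [] := by
  induction cs with
  | nil => intro cur; simp [pvLines_nil]
  | cons c rest ih =>
    intro cur
    by_cases hc : c = '\n'
    · subst hc; simp [pvLines_nl]
    · simp [pvLines_other hc, ih]

theorem pvLines_join (cs : List Char) :
    ∀ cur, PySem.Chars.join ['\n'] (pvLines cur cs) = cur ++ cs := by
  induction cs with
  | nil => intro cur; simp [pvLines, PySem.Chars.join_singleton]
  | cons c rest ih =>
    intro cur
    by_cases hc : c = '\n'
    · subst hc
      rw [pvLines_nl]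
      obtain ⟨h, t, he⟩ : ∃ h t, pvLines ([] : List Char) rest = h :: t := by
        cases hx : pvLines ([] : List Char) rest with
        | nil => exact absurd hx (pvLines_ne_nil rest [])
        | cons h t => exact ⟨h, t, rfl⟩
      rw [he, PySem.Chars.join_cons_cons, ← he, ih []]
      simp
    · rw [pvLines_other hc, ih (cur ++ [c])]
      simp
theorem pvLines_noNL (cs : List Char) :
    ∀ cur, '\n' ∉ cur → ∀ l ∈ pvLines cur cs, '\n' ∉ l := by
  induction cs with
  | nil => intro cur hcur l hl; simp [pvLines_nil] at hl; subst hl; exact hcur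
  | cons c rest ih =>
    intro cur hcur l hl
    by_cases hc : c = '\n'
    · subst hc
      rw [pvLines_nl] at hl
      rcases List.mem_cons.mp hl with h | h
      · subst h; exact hcur
      · exact ih [] (by simp) l h
    · rw [pvLines_other hc] at hl
      exact ih (cur ++ [c]) (by simp [hcur]; exact fun hh => absurd hh.symm hc) l hl

-- ---- B-side: line-level reading of the char scan ----
def pvTailJoin (S : List (List Char)) : List Char := (S.map (fun l => '\n' :: l)).flatten

theorem pvJoinTail (S : List (List Char)) (l0 : List Char) :
    PySem.Chars.join ['\n'] (l0 :: S) = l0 ++ pvTailJoin S := by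
  induction S generalizing l0 with
  | nil => simp [pvTailJoin, PySem.Chars.join_singleton]
  | cons a r ih =>
    rw [PySem.Chars.join_cons_cons, ih a]
    simp [pvTailJoin]

def pvBSpec : Bool → List (List Char) → List Char
  | _, [] => []
  | pn, [c] => (if pn && pvAltIsKey c then '\n' :: c else c)
  | pn, c :: c' :: cs =>
      (if pn && pvAltIsKey c then '\n' :: c else c) ++ '\n' :: pvBSpec (decide (c ≠ [])) (c' :: cs)

theorem pvSpill_bspec (rest : List (List Char)) :
    ∀ prev : List Char,
      pvTailJoin (pvSpill prev rest)
      = match rest with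
        | [] => []
        | _ :: _ => '\n' :: pvBSpec (decide (prev ≠ [])) rest := by
  induction rest with
  | nil => intro prev; simp [pvSpill, pvTailJoin]
  | cons c cs ih =>
    intro prev
    have hsplit : pvTailJoin (pvSpill prev (c :: cs))
        = (if decide (prev ≠ []) && pvAltIsKey c then '\n' :: '\n' :: c else '\n' :: c)
          ++ pvTailJoin (pvSpill c cs) := by
      simp only [pvSpill, pvTailJoin, List.map_append, List.flatten_append]
      split_ifs <;> simp
    rw [hsplit, ih c]
    cases cs with
    | nil => simp only [pvBSpec]; split_ifs <;> simp
    | cons c' cs' => simp only [pvBSpec]; split_ifs <;> simp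

def pvLastO (p1 : Option Char) (l : List Char) : Option Char := l.getLast?.or p1

theorem pvLastO_cons (p1 : Option Char) (c : Char) (t : List Char) :
    pvLastO p1 (c :: t) = pvLastO (some c) t := by
  unfold pvLastO
  cases t with
  | nil => simp
  | cons a b =>
    rw [List.getLast?_cons_cons]
    cases hb : (a :: b).getLast? with
    | none => simp [List.getLast?_eq_none_iff] at hb
    | some d => simp

theorem pvLastO_of_noNL (l : List Char) (h : '\n' ∉ l) (hne : l ≠ []) :
    ∃ d, pvLastO (some '\n') l = some d ∧ d ≠ '\n' := by
  obtain ⟨a, t, rfl⟩ := List.exists_cons_of_ne_nil hne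
  refine ⟨(a :: t).getLast (by simp), ?_, fun hh => h (hh ▸ List.getLast_mem _)⟩
  unfold pvLastO
  rw [List.getLast?_eq_some_getLast (by simp)]
  simp

-- inside a line no gap matches (the lookbehind needs p1 = '\n')
theorem pvCopyLine (l : List Char) :
    ∀ (p2 p1 : Option Char), '\n' ∉ l → p1 ≠ some '\n' → ∀ rest,
      ∃ q, pvSubGo p2 p1 (l ++ rest) = l ++ pvSubGo q (pvLastO p1 l) rest := by
  induction l with
  | nil => intro p2 p1 _ _ rest; exact ⟨p2, by simp [pvLastO]⟩
  | cons c t ih =>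
    intro p2 p1 hl hp1 rest
    have hc : c ≠ '\n' := fun h => hl (h ▸ List.mem_cons_self ..)
    have hlb : pvLookbehind p2 p1 = false := by
      unfold pvLookbehind
      have : (p1 == some '\n') = false := by
        cases p1 with
        | none => rfl
        | some d => simp; intro h; exact hp1 (by rw [h])
      simp [this]
    obtain ⟨q, hq⟩ := ih p1 (some c) (fun h => hl (List.mem_cons_of_mem _ h))
      (by simp [hc]) rest
    refine ⟨q, ?_⟩
    simp only [List.cons_append, pvSubGo, hlb, Bool.false_and, if_neg Bool.false_ne_true]
    rw [hq, pvLastO_cons]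

theorem pvKeyAhead_line (c : List Char) :
    ∀ tail, '\n' ∉ c → (tail = [] ∨ ∃ r, tail = '\n' :: r) →
      pvKeyAhead (c ++ tail) = PySem.Chars.isIn [':'] c := by
  induction c with
  | nil =>
    intro tail _ ht
    have : PySem.Chars.isIn [':'] ([] : List Char) = false := by decide
    rcases ht with h | ⟨r, h⟩ <;> subst h <;> simp [pvKeyAhead, this]
  | cons ch t ih =>
    intro tail hl ht
    have hch : ch ≠ '\n' := fun h => hl (h ▸ List.mem_cons_self ..)
    have hmem : ∀ (l : List Char), PySem.Chars.isIn [':'] l = l.contains ':' := by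
      intro l
      by_cases h : (':' : Char) ∈ l
      · obtain ⟨s, t', rfl⟩ := List.append_of_mem h
        rw [(PySem.Chars.isIn_iff_infix [':'] _).mpr ⟨s, t', by simp⟩]
        simp [h]
      · rw [(PySem.Chars.isIn_eq_false_iff [':'] _).mpr
          (fun ⟨s, t', he⟩ => h (by rw [← he]; simp))]
        simp [h]
    by_cases hcolon : ch = ':'
    · subst hcolon
      simp [pvKeyAhead, hmem]
    · have h1 : ¬ ((ch == '\n') = true) := by simp [hch]
      have h2 : ¬ ((ch == ':') = true) := by simp [hcolon]
      simp only [List.cons_append, pvKeyAhead, if_neg h1, if_neg h2]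
      rw [ih tail (fun h => hl (List.mem_cons_of_mem _ h)) ht, hmem, hmem]
      have h3 : (decide ((':' : Char) = ch)) = false := by
        simp; exact fun h => hcolon h.symm
      simp [h3]

theorem pvLB (q : Option Char) (pn : Bool)
    (hq : (∃ d, q = some d ∧ d ≠ '\n') ↔ pn = true) :
    pvLookbehind q (some '\n') = pn := by
  unfold pvLookbehind
  cases q with
  | none =>
    simp only [beq_self_eq_true, Bool.true_and]
    cases pn with
    | false => rfl
    | true => exfalso; obtain ⟨d, hd, _⟩ := hq.mpr rfl; exact absurd hd (by simp)
  | some d =>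
    simp only [beq_self_eq_true, Bool.true_and]
    by_cases hd : d = '\n'
    · subst hd
      have : pn = false := by
        cases pn with
        | false => rfl
        | true => obtain ⟨e, he, hne⟩ := hq.mpr rfl; exact absurd (Option.some.inj he).symm hne
      simp [this]
    · have : pn = true := hq.mp ⟨d, rfl, hd⟩
      simp [this, bne_iff_ne, hd]

-- one whole line: the only candidate gap is the line's first char
theorem pvLineStep (c : List Char) (hc : '\n' ∉ c) (q : Option Char) (pn : Bool)
    (hq : (∃ d, q = some d ∧ d ≠ '\n') ↔ pn = true)
    (tail : List Char) (htail : tail = [] ∨ ∃ r, tail = '\n' :: r) :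
    ∃ q', pvSubGo q (some '\n') (c ++ tail)
      = (if pn && pvAltIsKey c then '\n' :: c else c) ++ pvSubGo q' (pvLastO (some '\n') c) tail := by
  cases c with
  | nil =>
    refine ⟨q, ?_⟩
    simp [pvAltIsKey, pvLastO]
  | cons ch t =>
    have hch : ch ≠ '\n' := fun h => hc (h ▸ List.mem_cons_self ..)
    have hka := pvKeyAhead_line (ch :: t) tail hc htail
    obtain ⟨q', hcopy⟩ := pvCopyLine t (some '\n') (some ch)
      (fun h => hc (List.mem_cons_of_mem _ h)) (by simp [hch]) tail
    refine ⟨q', ?_⟩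
    have hcond : (pvLookbehind q (some '\n') && !(ch == ' ') && !(ch == '\n') && !(ch == '-')
          && pvKeyAhead ((ch :: t) ++ tail))
        = (pn && pvAltIsKey (ch :: t)) := by
      rw [pvLB q pn hq, hka]
      simp only [pvAltIsKey]
      have hnn : (!(ch == '\n')) = true := by simp [hch]
      rw [hnn]
      cases pn <;> simp [Bool.and_assoc]
    have hunf : pvSubGo q (some '\n') ((ch :: t) ++ tail)
        = if (pvLookbehind q (some '\n') && !(ch == ' ') && !(ch == '\n') && !(ch == '-')
              && pvKeyAhead ((ch :: t) ++ tail))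
          then '\n' :: ch :: pvSubGo (some '\n') (some ch) (t ++ tail)
          else ch :: pvSubGo (some '\n') (some ch) (t ++ tail) := by
      simp [pvSubGo]
    rw [hunf, hcond, hcopy, pvLastO_cons]
    cases (pn && pvAltIsKey (ch :: t)) <;> simp

theorem pvScanLines (ls : List (List Char)) :
    ∀ (pn : Bool) (q : Option Char), (∀ l ∈ ls, '\n' ∉ l) →
      ((∃ d, q = some d ∧ d ≠ '\n') ↔ pn = true) →
      pvSubGo q (some '\n') (PySem.Chars.join ['\n'] ls) = pvBSpec pn ls := by
  induction ls with
  | nil => intro pn q _ _; simp [PySem.Chars.join_nil, pvSubGo, pvBSpec]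
  | cons c cs ih =>
    intro pn q hnl hq
    have hcnl : '\n' ∉ c := hnl c (List.mem_cons_self ..)
    cases cs with
    | nil =>
      rw [PySem.Chars.join_singleton]
      obtain ⟨q', hline⟩ := pvLineStep c hcnl q pn hq [] (Or.inl rfl)
      rw [List.append_nil] at hline
      rw [hline]
      simp [pvSubGo, pvBSpec]
    | cons c' cs' =>
      have hjoin : PySem.Chars.join ['\n'] (c :: c' :: cs')
          = c ++ ('\n' :: PySem.Chars.join ['\n'] (c' :: cs')) := by
        rw [PySem.Chars.join_cons_cons]; simp
      rw [hjoin]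
      obtain ⟨q', hline⟩ := pvLineStep c hcnl q pn hq _ (Or.inr ⟨_, rfl⟩)
      rw [hline]
      have hsep : pvSubGo q' (pvLastO (some '\n') c) ('\n' :: PySem.Chars.join ['\n'] (c' :: cs'))
          = '\n' :: pvSubGo (pvLastO (some '\n') c) (some '\n') (PySem.Chars.join ['\n'] (c' :: cs')) := by
        simp [pvSubGo]
      rw [hsep]
      rw [ih (decide (c ≠ [])) (pvLastO (some '\n') c)
        (fun l hl => hnl l (List.mem_cons_of_mem _ hl))
        (by
          by_cases hce : c = []
          · subst hce
            simp only [pvLastO, List.getLast?_nil, Option.or]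
            constructor
            · rintro ⟨d, hd, hne⟩; exact absurd (Option.some.inj hd).symm hne
            · intro h; simp at h
          · obtain ⟨d, hd, hne⟩ := pvLastO_of_noNL c hcnl hce
            have hT : decide (c ≠ []) = true := by simp [hce]
            rw [hT]
            exact ⟨fun _ => rfl, fun _ => ⟨d, hd, hne⟩⟩)]
      simp only [pvBSpec]

-- ===== VERDICT (by name: the statement is the Claim_ definition above) =====
theorem add_blank_lines_before_sections_py_spec : Claim_equal_add_blank_lines_before_sections_py := by
  intro content _
  unfold Spec_add_blank_lines_before_sections_py
  unfold add_blank_lines_before_sections_py add_blank_lines_before_sections_py_alt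
  have hsplit := pvSplit_eq content.toList
  obtain ⟨l0, rest, hshape⟩ : ∃ l0 rest, pvLines [] content.toList = l0 :: rest := by
    cases hx : pvLines ([] : List Char) content.toList with
    | nil => exact absurd hx (pvLines_ne_nil content.toList [])
    | cons h t => exact ⟨h, t, rfl⟩
  have hnl : ∀ l ∈ l0 :: rest, '\n' ∉ l := by
    rw [← hshape]; exact pvLines_noNL content.toList [] (by simp)
  have hcs : content.toList = PySem.Chars.join ['\n'] (l0 :: rest) := by
    rw [← hshape, pvLines_join content.toList []]; simp
  -- A's side
  rw [hsplit, hshape]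
  simp only [PySem.List.enumerate_cons, List.foldl_cons]
  have h0 : (decide ((0:Int) > 0)) = false := by decide
  simp only [h0, Bool.and_false, if_neg (by simp : ¬ (false = true)), List.nil_append]
  rw [show (0:Int)+1 = 1 from rfl, pvFoldA rest [l0] l0 1 (by omega) (by simp) (by simp)]
  -- B's side
  conv_rhs => rw [hcs]
  rw [show ([l0] ++ pvSpill l0 rest) = l0 :: pvSpill l0 rest by simp]
  rw [pvJoinTail, pvSpill_bspec rest l0]
  congr 1
  cases rest with
  | nil =>
    rw [PySem.Chars.join_singleton]
    obtain ⟨q, hline⟩ := pvCopyLine l0 none none (hnl l0 (List.mem_cons_self ..)) (by simp) []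
    rw [List.append_nil] at hline
    rw [hline]
    simp [pvSubGo]
  | cons r0 rs =>
    have hjoin : PySem.Chars.join ['\n'] (l0 :: r0 :: rs)
        = l0 ++ ('\n' :: PySem.Chars.join ['\n'] (r0 :: rs)) := by
      rw [PySem.Chars.join_cons_cons]; simp
    rw [hjoin]
    obtain ⟨q, hline⟩ := pvCopyLine l0 none none (hnl l0 (List.mem_cons_self ..)) (by simp) _
    rw [hline]
    have hl0nl : '\n' ∉ l0 := hnl l0 (List.mem_cons_self ..)
    have hp1 : pvLastO (none : Option Char) l0 ≠ some '\n' := by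
      by_cases hce : l0 = []
      · subst hce; simp [pvLastO]
      · obtain ⟨a, t, rfl⟩ := List.exists_cons_of_ne_nil hce
        unfold pvLastO
        rw [List.getLast?_eq_some_getLast (by simp)]
        simp
        exact fun hh => hl0nl (hh ▸ List.getLast_mem _)
    have hsep : pvSubGo q (pvLastO none l0) ('\n' :: PySem.Chars.join ['\n'] (r0 :: rs))
        = '\n' :: pvSubGo (pvLastO none l0) (some '\n') (PySem.Chars.join ['\n'] (r0 :: rs)) := by
      simp [pvSubGo]
    rw [hsep]
    rw [pvScanLines (r0 :: rs) (decide (l0 ≠ [])) (pvLastO none l0)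
      (fun l hl => hnl l (List.mem_cons_of_mem _ hl))
      (by
        by_cases hce : l0 = []
        · subst hce
          simp only [pvLastO, List.getLast?_nil, Option.or]
          constructor
          · rintro ⟨d, hd, hne⟩; exact absurd hd (by simp)
          · intro h; simp at h
        · obtain ⟨a, t, rfl⟩ := List.exists_cons_of_ne_nil hce
          have hlast : pvLastO (none : Option Char) (a :: t) = some ((a :: t).getLast (by simp)) := by
            unfold pvLastO
            rw [List.getLast?_eq_some_getLast (by simp)]
            simp
          rw [hlast]
          have hT : decide ((a :: t) ≠ []) = true := by simp
          rw [hT]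
          exact ⟨fun _ => rfl, fun _ =>
            ⟨(a :: t).getLast (by simp), rfl, fun hh => hl0nl (hh ▸ List.getLast_mem _)⟩⟩)]
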